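-- pv_equiv track=rewrite | github.com/diegojoel301/Programacion | INF-143/contest_5/D/main.py | f
-- ===== SOURCE A (Python) =====
-- def y(x, m, n):
-- 	return m * x - n
--
-- def f(n):
-- 	l = len(str(n))
-- 	cota_inferior = 10 ** (l - 1)
-- 	num = 9
-- 	s = 9
-- 	while len(str(num)) != l:
-- 		num = int(str(num) + "9")
-- 		s += num
-- 	return l, s - num, y(cota_inferior, l, s - num)
-- ===== SOURCE B (Python) =====
-- def y(x, m, n):
-- 	return m * x - n
--
-- def f(n):
-- 	l = len(str(n))
-- 	t = (10 ** l - 10) // 9 - (l - 1)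
-- 	return l, t, y(10 ** (l - 1), l, t)
-- ===== Notes on version B (the rewrite author's own statement) =====
-- stated objective: simpler
-- what changed: Replaced the while-loop that repeatedly builds repdigit strings and accumulates their sum by a direct arithmetic closed form t = (10**l - 10)//9 - (l - 1) for s - num.
import Mathlib
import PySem

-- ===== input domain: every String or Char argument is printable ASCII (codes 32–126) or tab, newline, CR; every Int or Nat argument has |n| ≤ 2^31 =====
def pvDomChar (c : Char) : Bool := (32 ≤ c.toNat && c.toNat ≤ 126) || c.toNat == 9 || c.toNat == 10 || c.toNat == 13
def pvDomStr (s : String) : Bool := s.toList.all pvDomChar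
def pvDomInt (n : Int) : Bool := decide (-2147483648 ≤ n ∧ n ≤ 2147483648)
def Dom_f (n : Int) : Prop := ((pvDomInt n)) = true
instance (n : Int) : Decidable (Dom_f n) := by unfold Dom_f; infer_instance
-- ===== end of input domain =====

-- B replaces A's repdigit-string-building while-loop by the closed form
-- t = (10**l - 10)//9 - (l - 1); objective: simpler.

-- ===== PORT A =====
-- helper y(x, m, n) = m * x - n
def y (x m nn : Int) : Int := m * x - nn

-- the while-loop: while len(str(num)) != l: num = int(str(num) + "9"); s += num
-- (fuel only makes the recursion total; fuel = l.toNat always suffices, since num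
-- starts with 1 digit and gains exactly one digit per iteration, so the loop body
-- runs l - 1 times; strings are handled as their char lists, bridged by toList_toStr)
def fLoop (l : Int) : Nat → Int → Int → Int × Int
  | 0, num, s => (num, s)
  | fuel+1, num, s =>
    if ((PySem.Int.toChars num).length : Int) ≠ l then
      let num' := (PySem.Int.ofChars? (PySem.Int.toChars num ++ ['9'])).getD 0
      fLoop l fuel num' (s + num')
    else (num, s)

def f (n : Int) : Int × Int × Int :=
  let l : Int := ((PySem.Int.toChars n).length : Int)   -- l = len(str(n))
  -- 10 ** (l - 1): l ≥ 1 always (str(n) is never empty), so .toNat is exact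
  let cota_inferior : Int := 10 ^ (l - 1).toNat
  let p := fLoop l l.toNat 9 9
  (l, p.2 - p.1, y cota_inferior l (p.2 - p.1))

-- ===== PORT B =====
def f_alt (n : Int) : Int × Int × Int :=
  let l : Int := ((PySem.Int.toChars n).length : Int)   -- l = len(str(n))
  let t : Int := PySem.Int.floordiv (10 ^ l.toNat - 10) 9 - (l - 1)
  (l, t, y (10 ^ (l - 1).toNat) l t)

-- ===== PRECONDITION & SPEC =====
def Spec_f (n : Int) (out : Int × Int × Int) : Prop := out = f_alt n
instance (n : Int) (out : Int × Int × Int) : Decidable (Spec_f n out) := by unfold Spec_f; infer_instance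

-- ===== CLAIM (what is proved, stated in full; the proofs are below) =====
def Claim_equal_f : Prop := ∀ (n : Int), Dom_f n → Spec_f n (f n)

-- ===== LEMMAS AND PROOFS =====

theorem toDigitsCore_len_le (b : Nat) :
    ∀ (fuel n : Nat) (l : List Char), l.length ≤ (Nat.toDigitsCore b fuel n l).length := by
  intro fuel
  induction fuel with
  | zero => intro n l; simp [Nat.toDigitsCore]
  | succ fu ih =>
    intro n l
    simp only [Nat.toDigitsCore]
    split
    · simp
    · exact le_trans (by simp) (ih _ _)

theorem one_le_toDigits_len (b m : Nat) : 1 ≤ (Nat.toDigits b m).length := by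
  unfold Nat.toDigits
  simp only [Nat.toDigitsCore]
  split
  · simp
  · exact le_trans (by simp) (toDigitsCore_len_le _ _ _ _)

theorem one_le_toChars_len (n : Int) : 1 ≤ (PySem.Int.toChars n).length := by
  unfold PySem.Int.toChars
  split
  · simp
  · exact one_le_toDigits_len _ _

theorem toChars_len_le (n : Int) (h : Dom_f n) : (PySem.Int.toChars n).length ≤ 11 := by
  have hb : -2147483648 ≤ n ∧ n ≤ 2147483648 := by
    simpa [Dom_f, pvDomInt] using h
  unfold PySem.Int.toChars
  split
  · have hlt : n.natAbs < 10 ^ 10 := by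
      have : n.natAbs ≤ 2147483648 := by omega
      omega
    have := Nat.toDigits_length 10 n.natAbs 10 (by norm_num) hlt
    simp only [List.length_cons]
    omega
  · have hlt : n.toNat < 10 ^ 10 := by omega
    have := Nat.toDigits_length 10 n.toNat 10 (by norm_num) hlt
    omega

-- ===== VERDICT (by name: the statement is the Claim_ definition above) =====
theorem f_spec : Claim_equal_f := by
  intro n hdom
  unfold Spec_f f f_alt
  have h1 := one_le_toChars_len n
  have h2 := toChars_len_le n hdom
  generalize hg : (PySem.Int.toChars n).length = L at h1 h2 ⊢
  interval_cases L <;> decide
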